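-- pv_equiv track=rewrite | github.com/chrquija/Advantec-Dashboard-app | streamlit_app.py | get_cycle_length_recommendation
-- ===== SOURCE A (Python) =====
-- def get_cycle_length_recommendation(hourly_volumes):
--     """
--     Return recommended cycle length based on the highest volume hour in the period.
--     Volume thresholds are: 305, 605, 1505, 2405 (all +5 from your original table).
--     """
--     cycle = "Free mode"
--     for v in hourly_volumes:
--         if v >= 2400:
--             return "140 sec"
--         elif v >= 1500:
--             cycle = "130 sec"
--         elif v >= 600:
--             if cycle not in ["130 sec", "140 sec"]:
--                 cycle = "120 sec"
--         elif v >= 300: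
--             if cycle not in ["120 sec", "130 sec", "140 sec"]:
--                 cycle = "110 sec"
--     return cycle
-- ===== SOURCE B (Python) =====
-- def get_cycle_length_recommendation(hourly_volumes):
--     if not hourly_volumes:
--         return "Free mode"
--     m = max(hourly_volumes)
--     if m >= 2400:
--         return "140 sec"
--     elif m >= 1500:
--         return "130 sec"
--     elif m >= 600:
--         return "120 sec"
--     elif m >= 300:
--         return "110 sec"
--     else:
--         return "Free mode"
-- ===== Notes on version B (the rewrite author's own statement) =====
-- stated objective: simpler
-- what changed: B separates the max-reduction from the classification: it takes max(hourly_volumes) once and classifies it with a single if/elif chain, instead of ratcheting a band variable with membership checks per element.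
import Mathlib
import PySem

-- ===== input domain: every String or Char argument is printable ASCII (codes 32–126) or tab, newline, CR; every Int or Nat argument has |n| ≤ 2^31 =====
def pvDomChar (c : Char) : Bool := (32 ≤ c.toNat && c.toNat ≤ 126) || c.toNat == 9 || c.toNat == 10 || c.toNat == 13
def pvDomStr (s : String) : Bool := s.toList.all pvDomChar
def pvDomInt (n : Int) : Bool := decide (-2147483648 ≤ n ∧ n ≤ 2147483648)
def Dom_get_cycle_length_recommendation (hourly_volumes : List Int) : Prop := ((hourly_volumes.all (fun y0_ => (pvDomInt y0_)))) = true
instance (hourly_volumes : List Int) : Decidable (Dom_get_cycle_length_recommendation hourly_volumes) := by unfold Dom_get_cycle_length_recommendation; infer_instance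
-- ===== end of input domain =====

-- B computes max(hourly_volumes) once and classifies it with a single if/elif chain (simpler decomposition); same value as A everywhere.

-- ===== PORT A =====
-- A's loop with early return on v >= 2400, transcribed as structural recursion over the list carrying the `cycle` accumulator.
def get_cycle_length_recommendation_loop (cycle : String) : List Int → String
  | [] => cycle
  | v :: rest =>
      if v ≥ 2400 then "140 sec"
      else if v ≥ 1500 then get_cycle_length_recommendation_loop "130 sec" rest
      else if v ≥ 600 then
        if cycle ∉ ["130 sec", "140 sec"] then get_cycle_length_recommendation_loop "120 sec" rest
        else get_cycle_length_recommendation_loop cycle rest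
      else if v ≥ 300 then
        if cycle ∉ ["120 sec", "130 sec", "140 sec"] then get_cycle_length_recommendation_loop "110 sec" rest
        else get_cycle_length_recommendation_loop cycle rest
      else get_cycle_length_recommendation_loop cycle rest

def get_cycle_length_recommendation (hourly_volumes : List Int) : String :=
  get_cycle_length_recommendation_loop "Free mode" hourly_volumes

-- ===== PORT B =====
def get_cycle_length_recommendation_alt (hourly_volumes : List Int) : String :=
  match hourly_volumes with
  | [] => "Free mode"
  | h :: t =>
      let m := t.foldl max h   -- max(hourly_volumes)
      if m ≥ 2400 then "140 sec"
      else if m ≥ 1500 then "130 sec"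
      else if m ≥ 600 then "120 sec"
      else if m ≥ 300 then "110 sec"
      else "Free mode"

-- ===== PRECONDITION & SPEC =====
def Spec_get_cycle_length_recommendation (hourly_volumes : List Int) (out : String) : Prop := out = get_cycle_length_recommendation_alt hourly_volumes
instance (hourly_volumes : List Int) (out : String) : Decidable (Spec_get_cycle_length_recommendation hourly_volumes out) := by unfold Spec_get_cycle_length_recommendation; infer_instance

-- ===== CLAIM (what is proved, stated in full; the proofs are below) =====
def Claim_equal_get_cycle_length_recommendation : Prop := ∀ (hourly_volumes : List Int), Dom_get_cycle_length_recommendation hourly_volumes → Spec_get_cycle_length_recommendation hourly_volumes (get_cycle_length_recommendation hourly_volumes)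

-- ===== LEMMAS AND PROOFS =====

-- band rank of a single volume, the string for a rank, and the sup of band ranks over a list
def pvBand (v : Int) : Nat :=
  if v ≥ 2400 then 4 else if v ≥ 1500 then 3 else if v ≥ 600 then 2 else if v ≥ 300 then 1 else 0

def pvStr (c : Nat) : String :=
  match c with
  | 0 => "Free mode" | 1 => "110 sec" | 2 => "120 sec" | 3 => "130 sec" | _ => "140 sec"

def pvSup (l : List Int) : Nat := l.foldr (fun v r => max (pvBand v) r) 0

theorem pvStr_ge4 (n : Nat) (h : 4 ≤ n) : pvStr n = "140 sec" := by
  rcases n with _|_|_|_|n <;> first | omega | rfl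

-- A's loop computes the string of max(rank of accumulator, sup of bands of the remaining list)
theorem loop_eq (l : List Int) : ∀ c : Nat, c ≤ 3 →
    get_cycle_length_recommendation_loop (pvStr c) l = pvStr (max c (pvSup l)) := by
  induction l with
  | nil =>
    intro c hc
    simp [get_cycle_length_recommendation_loop, pvSup]
  | cons v rest ih =>
    intro c hc
    have hsup : pvSup (v :: rest) = max (pvBand v) (pvSup rest) := rfl
    rw [hsup]
    rw [get_cycle_length_recommendation_loop]
    by_cases h4 : v ≥ 2400
    · have hb : pvBand v = 4 := by simp [pvBand, h4]
      rw [if_pos h4, hb, pvStr_ge4 _ (by omega)]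
    · have h4' := h4
      by_cases h3 : v ≥ 1500
      · have hb : pvBand v = 3 := by simp [pvBand, h4, h3]
        rw [if_neg h4, if_pos h3]
        rw [show ("130 sec" : String) = pvStr 3 from rfl, ih 3 (by omega), hb]
        congr 1 <;> omega
      · by_cases h2 : v ≥ 600
        · have hb : pvBand v = 2 := by simp [pvBand, h4, h3, h2]
          rw [if_neg h4, if_neg h3, if_pos h2, hb]
          interval_cases c
          · rw [if_pos (by decide), show ("120 sec" : String) = pvStr 2 from rfl,
              ih 2 (by omega)]
            congr 1
          · rw [if_pos (by decide), show ("120 sec" : String) = pvStr 2 from rfl,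
              ih 2 (by omega)]
            congr 1 <;> omega
          · rw [if_pos (by decide), show ("120 sec" : String) = pvStr 2 from rfl,
              ih 2 (by omega)]
            congr 1 <;> omega
          · rw [if_neg (by decide), ih 3 (by omega)]
            congr 1 <;> omega
        · by_cases h1 : v ≥ 300
          · have hb : pvBand v = 1 := by simp [pvBand, h4, h3, h2, h1]
            rw [if_neg h4, if_neg h3, if_neg h2, if_pos h1, hb]
            interval_cases c
            · rw [if_pos (by decide), show ("110 sec" : String) = pvStr 1 from rfl,
                ih 1 (by omega)]
              congr 1
            · rw [if_pos (by decide), show ("110 sec" : String) = pvStr 1 from rfl,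
                ih 1 (by omega)]
              congr 1 <;> omega
            · rw [if_neg (by decide), ih 2 (by omega)]
              congr 1 <;> omega
            · rw [if_neg (by decide), ih 3 (by omega)]
              congr 1 <;> omega
          · have hb : pvBand v = 0 := by simp [pvBand, h4, h3, h2, h1]
            rw [if_neg h4, if_neg h3, if_neg h2, if_neg h1, hb, ih c hc]
            congr 1

theorem pvBand_mono {a b : Int} (h : a ≤ b) : pvBand a ≤ pvBand b := by
  unfold pvBand; split_ifs <;> omega

theorem pvBand_max (a b : Int) : pvBand (max a b) = max (pvBand a) (pvBand b) := by
  rcases le_total a b with h | h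
  · rw [max_eq_right h, Nat.max_eq_right (pvBand_mono h)]
  · rw [max_eq_left h, Nat.max_eq_left (pvBand_mono h)]

theorem band_foldl (t : List Int) : ∀ h : Int,
    pvBand (t.foldl max h) = max (pvBand h) (pvSup t) := by
  induction t with
  | nil => intro h; simp [pvSup]
  | cons v rest ih =>
    intro h
    have : pvSup (v :: rest) = max (pvBand v) (pvSup rest) := rfl
    rw [this]
    show pvBand (rest.foldl max (max h v)) = _
    rw [ih (max h v), pvBand_max]
    omega

theorem chain_eq (m : Int) :
    (if m ≥ 2400 then "140 sec"
     else if m ≥ 1500 then "130 sec"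
     else if m ≥ 600 then "120 sec"
     else if m ≥ 300 then "110 sec"
     else "Free mode") = pvStr (pvBand m) := by
  unfold pvBand pvStr
  split_ifs <;> rfl

-- ===== VERDICT (by name: the statement is the Claim_ definition above) =====
theorem get_cycle_length_recommendation_spec : Claim_equal_get_cycle_length_recommendation := by
  intro l _
  unfold Spec_get_cycle_length_recommendation
  cases l with
  | nil => rfl
  | cons h t =>
    have hB : get_cycle_length_recommendation_alt (h :: t) = pvStr (pvBand (t.foldl max h)) :=
      chain_eq (t.foldl max h)
    rw [hB, band_foldl]
    show get_cycle_length_recommendation_loop (pvStr 0) (h :: t) = _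
    rw [loop_eq _ 0 (by omega)]
    congr 1
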